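-- pv_equiv track=rewrite | github.com/ewa-suszek/python_tools | gtax/get_clients.py | get_client_property
-- ===== SOURCE A (Python) =====
-- def get_client_property(client_data, property_name, property_key):
--     user_present = False
--     property_value = ''
--     #check user first
--     for i in range(len(client_data)):
--         if property_name == client_data[i]['name'] and client_data[i]['type'] == 'user_defined':
--             property_value = client_data[i][property_key]
--             user_present = True
--             break
--     #then check auto if not user
--     if not user_present:
--         for i in range(len(client_data)):
--             if property_name == client_data[i]['name']:
--                 property_value = client_data[i][property_key]
--                 break
--     return property_value
-- ===== SOURCE B (Python) =====
-- def get_client_property(client_data, property_name, property_key):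
--     # single scan: return immediately on a user_defined match, remember the
--     # first name match otherwise (the entry, so its property_key is read lazily)
--     remembered = None
--     for entry in client_data:
--         if entry['name'] == property_name:
--             if entry['type'] == 'user_defined':
--                 return entry[property_key]
--             if remembered is None:
--                 remembered = entry
--     return remembered[property_key] if remembered is not None else ''
-- ===== Notes on version B (the rewrite author's own statement) =====
-- stated objective: simpler
-- what changed: Collapses A's two sequential scans into one pass that returns immediately on a user_defined name match and otherwise remembers the first name-matching entry, reading its property_key only after the loop.
import Mathlib
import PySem

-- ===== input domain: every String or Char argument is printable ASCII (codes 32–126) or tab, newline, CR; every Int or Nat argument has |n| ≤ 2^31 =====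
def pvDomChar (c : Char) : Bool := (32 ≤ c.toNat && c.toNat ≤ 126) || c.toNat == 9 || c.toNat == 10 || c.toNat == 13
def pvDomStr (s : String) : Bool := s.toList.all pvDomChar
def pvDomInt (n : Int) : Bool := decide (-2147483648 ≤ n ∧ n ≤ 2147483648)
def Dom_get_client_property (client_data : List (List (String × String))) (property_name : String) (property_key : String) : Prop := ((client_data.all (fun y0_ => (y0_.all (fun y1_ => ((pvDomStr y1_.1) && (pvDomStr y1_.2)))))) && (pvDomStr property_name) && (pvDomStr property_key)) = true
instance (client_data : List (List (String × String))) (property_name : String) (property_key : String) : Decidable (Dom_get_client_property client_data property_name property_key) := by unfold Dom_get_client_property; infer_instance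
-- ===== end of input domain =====

-- B collapses A's two sequential scans into one pass (return on user_defined match,
-- else remember the first name match); objective: simpler.


-- ===== PORT A =====
-- pass 1: first entry whose name matches AND type == 'user_defined' (dict reads via getD '';
-- Pre_ guarantees every key A actually reads is present, so getD agrees with Python's e[k])
def pvPass1 (client_data : List (List (String × String))) (property_name : String) (property_key : String) : Option String :=
  match client_data with
  | [] => none
  | e :: rest =>
    if property_name == PySem.Dict.getD (PySem.Dict.mk e) "name" "" && PySem.Dict.getD (PySem.Dict.mk e) "type" "" == "user_defined" then
      some (PySem.Dict.getD (PySem.Dict.mk e) property_key "")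
    else pvPass1 rest property_name property_key

-- pass 2: first entry whose name matches
def pvPass2 (client_data : List (List (String × String))) (property_name : String) (property_key : String) : Option String :=
  match client_data with
  | [] => none
  | e :: rest =>
    if property_name == PySem.Dict.getD (PySem.Dict.mk e) "name" "" then
      some (PySem.Dict.getD (PySem.Dict.mk e) property_key "")
    else pvPass2 rest property_name property_key

def get_client_property (client_data : List (List (String × String))) (property_name : String) (property_key : String) : String :=
  match pvPass1 client_data property_name property_key with
  | some v => v
  | none =>
    match pvPass2 client_data property_name property_key with
    | some v => v
    | none => ""

-- ===== PORT B =====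
-- single pass carrying the first name-matching entry (its property_key is read only at the end)
def pvAltLoop (client_data : List (List (String × String))) (property_name : String) (property_key : String) (remembered : Option (List (String × String))) : String :=
  match client_data with
  | [] =>
    match remembered with
    | some m => PySem.Dict.getD (PySem.Dict.mk m) property_key ""
    | none => ""
  | e :: rest =>
    if PySem.Dict.getD (PySem.Dict.mk e) "name" "" == property_name then
      if PySem.Dict.getD (PySem.Dict.mk e) "type" "" == "user_defined" then
        PySem.Dict.getD (PySem.Dict.mk e) property_key ""
      else
        pvAltLoop rest property_name property_key (match remembered with | none => some e | some m => some m)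
    else pvAltLoop rest property_name property_key remembered

def get_client_property_alt (client_data : List (List (String × String))) (property_name : String) (property_key : String) : String :=
  pvAltLoop client_data property_name property_key none

-- ===== PRECONDITION & SPEC =====
-- helper: entry is a well-formed user_defined name match (where A's first pass stops)
def pvIsUser (property_name : String) (e : List (String × String)) : Bool :=
  PySem.Dict.get? (PySem.Dict.mk e) "name" == some property_name && PySem.Dict.get? (PySem.Dict.mk e) "type" == some "user_defined"

-- Pre_ excludes exactly the inputs on which the Python A raises a KeyError: every entry A
-- scans must have 'name', every name match it scans must have 'type', and the entry whose
-- property_key A returns must have that key.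
def Pre_get_client_property (client_data : List (List (String × String))) (property_name : String) (property_key : String) : Prop :=
  ((client_data.takeWhile (fun e => ! pvIsUser property_name e)).all (fun e =>
      (PySem.Dict.get? (PySem.Dict.mk e) "name").isSome &&
      (!(PySem.Dict.get? (PySem.Dict.mk e) "name" == some property_name) || (PySem.Dict.get? (PySem.Dict.mk e) "type").isSome)) &&
   (match client_data.find? (pvIsUser property_name) with
    | some u => (PySem.Dict.get? (PySem.Dict.mk u) property_key).isSome
    | none =>
      match client_data.find? (fun e => PySem.Dict.get? (PySem.Dict.mk e) "name" == some property_name) with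
      | some m => (PySem.Dict.get? (PySem.Dict.mk m) property_key).isSome
      | none => true)) = true

instance (client_data : List (List (String × String))) (property_name : String) (property_key : String) : Decidable (Pre_get_client_property client_data property_name property_key) := by unfold Pre_get_client_property; infer_instance

def pvWitness_get_client_property : (List (List (String × String))) × String × String :=
  ([[("name", "c1"), ("type", "auto"), ("ip", "1.2.3.4")],
    [("name", "c1"), ("type", "user_defined"), ("ip", "5.6.7.8")]], "c1", "ip")

def Spec_get_client_property (client_data : List (List (String × String))) (property_name : String) (property_key : String) (out : String) : Prop := out = get_client_property_alt client_data property_name property_key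
instance (client_data : List (List (String × String))) (property_name : String) (property_key : String) (out : String) : Decidable (Spec_get_client_property client_data property_name property_key out) := by unfold Spec_get_client_property; infer_instance

-- ===== CLAIM (what is proved, stated in full; the proofs are below) =====
def Claim_equal_get_client_property : Prop := ∀ (client_data : List (List (String × String))) (property_name : String) (property_key : String), Dom_get_client_property client_data property_name property_key → Pre_get_client_property client_data property_name property_key → Spec_get_client_property client_data property_name property_key (get_client_property client_data property_name property_key)

-- ===== LEMMAS AND PROOFS =====

-- loop invariant: B's single pass equals "pass1 result, else the remembered entry, else pass2"
theorem pvAltLoop_eq (client_data : List (List (String × String))) (property_name property_key : String) (remembered : Option (List (String × String))) :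
    pvAltLoop client_data property_name property_key remembered =
      match pvPass1 client_data property_name property_key with
      | some v => v
      | none =>
        match remembered with
        | some m => PySem.Dict.getD (PySem.Dict.mk m) property_key ""
        | none =>
          match pvPass2 client_data property_name property_key with
          | some v => v
          | none => "" := by
  induction client_data generalizing remembered with
  | nil => rfl
  | cons e rest ih =>
    by_cases hn : PySem.Dict.getD (PySem.Dict.mk e) "name" "" = property_name
    · by_cases ht : PySem.Dict.getD (PySem.Dict.mk e) "type" "" = "user_defined"
      · simp [pvAltLoop, pvPass1, hn, ht]
      · cases remembered with
        | none =>
          have h2 : (property_name == PySem.Dict.getD (PySem.Dict.mk e) "name" "") = true := by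
            simp [hn]
          simp only [pvAltLoop, pvPass1, hn]
          simp [ih, ht, pvPass2, h2]
        | some m =>
          simp only [pvAltLoop, pvPass1, hn]
          simp [ih, ht]
    · have hn' : ¬ property_name = PySem.Dict.getD (PySem.Dict.mk e) "name" "" := fun h => hn h.symm
      simp only [pvAltLoop, pvPass1, pvPass2, hn, hn']
      simp [ih, hn, hn']

theorem get_eq_alt (client_data : List (List (String × String))) (property_name property_key : String) :
    get_client_property client_data property_name property_key =
      get_client_property_alt client_data property_name property_key := by
  rw [get_client_property_alt, pvAltLoop_eq, get_client_property]

theorem pvWitness_ok : Dom_get_client_property pvWitness_get_client_property.1 pvWitness_get_client_property.2.1 pvWitness_get_client_property.2.2 ∧ Pre_get_client_property pvWitness_get_client_property.1 pvWitness_get_client_property.2.1 pvWitness_get_client_property.2.2 := by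
  decide

-- ===== VERDICT (by name: the statement is the Claim_ definition above) =====
theorem get_client_property_spec : Claim_equal_get_client_property := by
  intro client_data property_name property_key _ _
  unfold Spec_get_client_property
  exact get_eq_alt client_data property_name property_key
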